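-- pv_equiv track=rewrite | github.com/Ra0ul/Algorithm | 프로그래머스/lv2/12973. 짝지어 제거하기/짝지어 제거하기.py | solution
-- ===== SOURCE A (Python) =====
-- def solution(s):
--     answer = -1
--     stack = []
--     """
--     두개 나오면 빼주기
--     """
--     for i in s:
--         if i not in stack:
--             stack.append(i)
--         else:
--             if stack[-1] == i:
--                 stack.pop()
--
--
--     if stack:
--         return 0
--     else:
--         return 1
-- ===== SOURCE B (Python) =====
-- def solution(s):
--     # Recursive-descent formulation of the same reduction: the explicit stack of A
--     # becomes the call stack (current top + set of buried elements).
--     n = len(s)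
--
--     def run(i, top, below):
--         # Consume elements until `top` is popped; return the index just after
--         # the pop, or None if the input is exhausted with `top` still pending.
--         while i < n:
--             c = s[i]
--             i += 1
--             if c == top:
--                 return i
--             if c not in below:
--                 i = run(i, c, below | {top})
--                 if i is None:
--                     return None
--             # else: c is buried -> ignored
--         return None
--
--     i = 0
--     while i < n:
--         i = run(i + 1, s[i], frozenset())
--         if i is None:
--             return 0
--     return 1
-- ===== Notes on version B (the rewrite author's own statement) =====
-- stated objective: alternative
-- what changed: A's explicit duplicate-free stack with a linear membership scan is replaced by a recursive-descent traversal: the stack lives on the call stack (current top element plus a frozenset of buried elements) and membership is a set lookup.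
import Mathlib
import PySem

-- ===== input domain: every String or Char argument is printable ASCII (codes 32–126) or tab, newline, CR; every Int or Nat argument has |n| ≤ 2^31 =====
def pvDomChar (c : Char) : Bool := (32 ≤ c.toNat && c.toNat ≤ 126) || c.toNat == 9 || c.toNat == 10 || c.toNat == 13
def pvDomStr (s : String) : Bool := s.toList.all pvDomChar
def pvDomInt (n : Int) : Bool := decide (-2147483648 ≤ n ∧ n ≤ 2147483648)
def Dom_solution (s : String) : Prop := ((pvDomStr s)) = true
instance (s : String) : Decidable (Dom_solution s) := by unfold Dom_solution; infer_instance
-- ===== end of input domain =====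

-- B replaces A's explicit stack + linear membership scan by recursive descent with a
-- set of buried elements (same result, different structure).

-- ===== PORT A =====
-- A's loop body: push if absent, pop if top matches, otherwise ignore.
def solutionStep (stack : List Char) (i : Char) : List Char :=
  if ¬ stack.contains i then stack ++ [i]
  else if PySem.List.pyGet? stack (-1) = some i then stack.dropLast
  else stack

def solution (s : String) : Int :=
  let stack := s.toList.foldl solutionStep []
  if stack ≠ [] then 0 else 1

-- ===== PORT B =====
-- run l top below: consume elements until `top` is popped; some rest = input just after
-- the pop, none = input exhausted with `top` still pending. `fuel` is a totality guard
-- only (the Python while-loop advances i strictly); fuel > l.length suffices.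
def runB (fuel : Nat) (l : List Char) (top : Char) (below : PySem.Set Char) : Option (List Char) :=
  match fuel with
  | 0 => none
  | fuel + 1 =>
    match l with
    | [] => none
    | c :: rest =>
      if c = top then some rest
      else if ¬ PySem.Set.contains below c then
        (runB fuel rest c (PySem.Set.add below top)).bind (fun rest' => runB fuel rest' top below)
      else runB fuel rest top below

-- outer while-loop of B (fuel likewise a totality guard)
def loopB (fuel : Nat) (l : List Char) : Int :=
  match fuel with
  | 0 => 0
  | fuel + 1 =>
    match l with
    | [] => 1
    | c :: rest =>
      (runB (rest.length + 1) rest c PySem.Set.empty).elim 0 (fun rest' => loopB fuel rest')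

def solution_alt (s : String) : Int :=
  loopB (s.toList.length + 1) s.toList

-- ===== PRECONDITION & SPEC =====
def Spec_solution (s : String) (out : Int) : Prop := out = solution_alt s
instance (s : String) (out : Int) : Decidable (Spec_solution s out) := by unfold Spec_solution; infer_instance

-- ===== CLAIM (what is proved, stated in full; the proofs are below) =====
def Claim_equal_solution : Prop := ∀ (s : String), Dom_solution s → Spec_solution s (solution s)

-- ===== LEMMAS AND PROOFS =====

-- A's step on a stack with known top.
theorem solutionStep_concat (st : List Char) (top c : Char) :
    solutionStep (st ++ [top]) c =
      if c = top then st
      else if c ∈ st then st ++ [top]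
      else st ++ [top] ++ [c] := by
  by_cases hc : c = top
  · subst hc
    by_cases hm : c ∈ st <;>
      simp [solutionStep, PySem.List.pyGet?_neg_one_append_singleton, hm]
  · by_cases hm : c ∈ st <;>
      simp [solutionStep, PySem.List.pyGet?_neg_one_append_singleton, hc, hm, Ne.symm hc]

-- one-step unfolding of runB at positive fuel
theorem runB_succ (fuel : Nat) (c : Char) (rest : List Char) (top : Char)
    (below : PySem.Set Char) :
    runB (fuel + 1) (c :: rest) top below =
      if c = top then some rest
      else if ¬ PySem.Set.contains below c then
        (runB fuel rest c (PySem.Set.add below top)).bind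
          (fun rest' => runB fuel rest' top below)
      else runB fuel rest top below := rfl

-- Core correspondence: runB with current top `top` and buried set `below` behaves like
-- A's machine started on the stack st ++ [top], where below agrees with st on membership.
theorem runB_spec (fuel : Nat) (l : List Char) (top : Char) (below : PySem.Set Char)
    (st : List Char) (hfuel : l.length < fuel)
    (hmem : ∀ c, c ∈ below ↔ c ∈ st) :
    (∀ l', runB fuel l top below = some l' →
      ∃ pre, l = pre ++ l' ∧ List.foldl solutionStep (st ++ [top]) pre = st ∧
        l'.length < l.length) ∧
    (runB fuel l top below = none → List.foldl solutionStep (st ++ [top]) l ≠ []) := by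
  induction fuel generalizing l top below st with
  | zero => omega
  | succ fuel ih =>
    match l with
    | [] =>
      refine ⟨fun l' h => by simp [runB] at h, fun _ => by simp⟩
    | c :: rest =>
      by_cases hc : c = top
      · subst hc
        rw [runB_succ, if_pos rfl]
        refine ⟨fun l' h => ?_, fun h => by simp at h⟩
        obtain rfl : rest = l' := by simpa using h
        exact ⟨[c], by simp, by simp [solutionStep_concat], by simp⟩
      · by_cases hb : c ∈ below
        · -- buried: ignored
          rw [runB_succ, if_neg hc, if_neg (by simp [hb])]
          have hstep : solutionStep (st ++ [top]) c = st ++ [top] := by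
            rw [solutionStep_concat]; simp [hc, (hmem c).mp hb]
          obtain ⟨ihs, ihn⟩ := ih rest top below st (by simp at hfuel ⊢; omega) hmem
          refine ⟨fun l' h => ?_, fun h => ?_⟩
          · obtain ⟨pre, hpre, hfold, hlen⟩ := ihs l' h
            exact ⟨c :: pre, by simp [hpre], by simp [hstep, hfold], by simp [hpre]⟩
          · simpa [hstep] using ihn h
        · -- push c
          rw [runB_succ, if_neg hc, if_pos (by simp [hb])]
          have hmst : c ∉ st := fun h => hb ((hmem c).mpr h)
          have hstep : solutionStep (st ++ [top]) c = (st ++ [top]) ++ [c] := by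
            rw [solutionStep_concat]; simp [hc, hmst]
          have hmem' : ∀ d, d ∈ PySem.Set.add below top ↔ d ∈ st ++ [top] := by
            intro d
            rw [PySem.Set.mem_add]
            simp [hmem d, or_comm]
          obtain ⟨ihs1, ihn1⟩ := ih rest c (PySem.Set.add below top) (st ++ [top])
            (by simp at hfuel ⊢; omega) hmem'
          refine ⟨fun l' h => ?_, fun h => ?_⟩
          · -- the inner run returned some rest', then the loop continued on rest'
            obtain ⟨rest', hr, hr2⟩ := Option.bind_eq_some_iff.mp h
            obtain ⟨pre, hpre, hfold, hlen⟩ := ihs1 rest' hr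
            obtain ⟨ihs2, _⟩ := ih rest' top below st
              (by simp [hpre] at hfuel ⊢; omega) hmem
            obtain ⟨pre2, hpre2, hfold2, hlen2⟩ := ihs2 l' hr2
            refine ⟨c :: (pre ++ pre2), by simp [hpre, hpre2], ?_, ?_⟩
            · simp only [List.foldl_cons, hstep, List.foldl_append, hfold, hfold2]
            · simp [hpre, hpre2]; omega
          · match hr : runB fuel rest c (PySem.Set.add below top) with
            | none =>
              simpa [hstep] using ihn1 hr
            | some rest' =>
              rw [hr] at h
              replace h : runB fuel rest' top below = none := by simpa using h
              obtain ⟨pre, hpre, hfold, hlen⟩ := ihs1 rest' hr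
              obtain ⟨_, ihn2⟩ := ih rest' top below st
                (by simp [hpre] at hfuel ⊢; omega) hmem
              have hne := ihn2 h
              intro hcontra
              apply hne
              have heq : List.foldl solutionStep (st ++ [top]) (c :: rest) =
                  List.foldl solutionStep (st ++ [top]) rest' := by
                simp only [List.foldl_cons, hstep, hpre, List.foldl_append, hfold]
              rw [← heq]; exact hcontra

theorem loopB_spec (fuel : Nat) (l : List Char) (hfuel : l.length < fuel) :
    loopB fuel l = if List.foldl solutionStep [] l ≠ [] then 0 else 1 := by
  induction fuel generalizing l with
  | zero => omega
  | succ fuel ih =>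
    match l with
    | [] => simp [loopB]
    | c :: rest =>
      obtain ⟨hs, hn⟩ := runB_spec (rest.length + 1) rest c PySem.Set.empty []
        (by omega) (by intro d; simp [PySem.Set.empty])
      have hstep0 : solutionStep [] c = [c] := by simp [solutionStep]
      show (runB (rest.length + 1) rest c PySem.Set.empty).elim 0
        (fun rest' => loopB fuel rest') = _
      match hr : runB (rest.length + 1) rest c PySem.Set.empty with
      | none =>
        have hne : List.foldl solutionStep (solutionStep [] c) rest ≠ [] := hn hr
        simp [hne]
      | some rest' =>
        obtain ⟨pre, hpre, hfold, hlen⟩ := hs rest' hr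
        have heq : List.foldl solutionStep [] (c :: rest) =
            List.foldl solutionStep [] rest' := by
          simp only [List.foldl_cons, hstep0, hpre, List.foldl_append]
          simpa using congrArg (fun st => List.foldl solutionStep st rest') hfold
        rw [Option.elim_some, ih rest' (by simp [hpre] at hfuel ⊢; omega), heq]

-- ===== VERDICT (by name: the statement is the Claim_ definition above) =====
theorem solution_spec : Claim_equal_solution := by
  intro s _
  unfold Spec_solution solution solution_alt
  rw [loopB_spec _ _ (by omega)]
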